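-- pv_equiv track=rewrite | github.com/geunu97/Algorithm_Python | 프로그래머스/월간 코드 챌린지 시즌1/(LV3) 스타 수열.py | solution
-- ===== SOURCE A (Python) =====
-- from collections import Counter
--
-- def solution(a):
--     answer = -1
--     dic = Counter(a)
--
--     for i in dic:
--         if dic[i] <= answer:
--             continue
--
--         i_count = 0
--         index = 0
--         while index < len(a)-1:
--             if (a[index] == i or a[index+1] == i) and (a[index] != a[index+1]):
--                 i_count += 1   #i 사용횟수 1증가
--                 index += 2          #인덱스 2 점프
--             else:
--                 index += 1          #바로 다음 인덱스
--
--         answer = max(i_count, answer)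
--
--
--     return answer * 2
-- ===== SOURCE B (Python) =====
-- def solution(a):
--     n = len(a)
--     pos = {}
--     for idx, x in enumerate(a):
--         pos.setdefault(x, []).append(idx)
--     best = -1
--     for i, ps in pos.items():
--         cnt = 0
--         cur = 0
--         for p in ps:
--             if p >= 1 and cur <= p - 1 and a[p - 1] != i:
--                 cnt += 1
--                 cur = p + 1
--             elif cur <= p and p + 1 <= n - 1 and a[p + 1] != i:
--                 cnt += 1
--                 cur = p + 2
--             else:
--                 cur = max(cur, p + 1)
--         best = max(best, cnt)
--     return best * 2
-- ===== Notes on version B (the rewrite author's own statement) =====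
-- stated objective: alternative
-- what changed: Instead of re-scanning the whole list for every distinct value, B collects each value's occurrence positions in one pass and simulates the same greedy pairing by walking only those positions; this is O(n) total where A's per-value rescan is O(n*k) in the worst case, though A's count-based pruning makes the two comparable on random data.
import Mathlib
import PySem

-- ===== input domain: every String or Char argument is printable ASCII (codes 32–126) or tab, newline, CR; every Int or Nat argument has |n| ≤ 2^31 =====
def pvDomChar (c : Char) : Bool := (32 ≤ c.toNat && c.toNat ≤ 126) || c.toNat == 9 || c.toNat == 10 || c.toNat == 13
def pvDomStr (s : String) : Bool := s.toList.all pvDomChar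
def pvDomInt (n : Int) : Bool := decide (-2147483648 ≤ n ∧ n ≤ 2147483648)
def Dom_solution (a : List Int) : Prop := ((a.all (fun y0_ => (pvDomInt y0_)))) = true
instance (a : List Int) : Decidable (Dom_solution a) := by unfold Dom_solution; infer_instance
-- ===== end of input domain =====

-- B replaces A's per-value rescan of the whole list by a per-value walk over that value's
-- occurrence positions (collected once), simulating the same greedy pairing; alternative algorithm.

-- ===== PORT A =====
-- the inner `while index < len(a)-1` greedy scan of A, for value i, state (index, i_count)
def scanA (a : List Int) (i : Int) (idx : Int) (cnt : Int) : Int :=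
  if h : idx < (a.length : Int) - 1 then
    if (PySem.List.pyGetD a idx 0 = i ∨ PySem.List.pyGetD a (idx + 1) 0 = i) ∧
        PySem.List.pyGetD a idx 0 ≠ PySem.List.pyGetD a (idx + 1) 0 then
      scanA a i (idx + 2) (cnt + 1)
    else
      scanA a i (idx + 1) cnt
  else cnt
termination_by ((a.length : Int) - idx).toNat
decreasing_by all_goals omega

def solution (a : List Int) : Int :=
  let dic := PySem.Dict.counter a
  let answer := dic.keys.foldl (fun answer i =>
    if dic.getD i 0 ≤ answer then answer
    else max (scanA a i 0 0) answer) (-1)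
  answer * 2

-- ===== PORT B =====
-- B's inner loop: greedy over the occurrence positions ps of value i, state (cur, cnt)
def scanB (a : List Int) (i : Int) : List Int → Int → Int → Int
  | [], _, cnt => cnt
  | p :: ps, cur, cnt =>
    if 1 ≤ p ∧ cur ≤ p - 1 ∧ PySem.List.pyGetD a (p - 1) 0 ≠ i then
      scanB a i ps (p + 1) (cnt + 1)
    else if cur ≤ p ∧ p + 1 ≤ (a.length : Int) - 1 ∧ PySem.List.pyGetD a (p + 1) 0 ≠ i then
      scanB a i ps (p + 2) (cnt + 1)
    else
      scanB a i ps (max cur (p + 1)) cnt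

def solution_alt (a : List Int) : Int :=
  let pos := (PySem.List.enumerate a).foldl
    (fun d q => d.modify q.2 [] (fun l => l ++ [q.1])) PySem.Dict.empty
  let best := pos.items.foldl (fun best q => max best (scanB a q.1 q.2 0 0)) (-1)
  best * 2

-- ===== PRECONDITION & SPEC =====
def Spec_solution (a : List Int) (out : Int) : Prop := out = solution_alt a
instance (a : List Int) (out : Int) : Decidable (Spec_solution a out) := by unfold Spec_solution; infer_instance

-- ===== CLAIM (what is proved, stated in full; the proofs are below) =====
def Claim_equal_solution : Prop := ∀ (a : List Int), Dom_solution a → Spec_solution a (solution a)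

-- ===== LEMMAS AND PROOFS =====

-- the list of positions of value i that B's dict stores
def posOf (a : List Int) (i : Int) : List Int :=
  (PySem.List.pyRange 0 (a.length : Int)).filter (fun j => PySem.List.pyGetD a j 0 == i)

lemma posOf_getD (a : List Int) (i : Int) :
    ((PySem.List.enumerate a).foldl
      (fun d q => d.modify q.2 [] (fun l => l ++ [q.1])) PySem.Dict.empty).getD i []
    = posOf a i := by
  rw [show (PySem.List.enumerate a).foldl
      (fun d q => d.modify q.2 [] (fun l => l ++ [q.1])) PySem.Dict.empty
    = ((PySem.List.enumerate a).map Prod.swap).foldl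
      (fun d p => d.modify p.1 [] (fun l => l ++ [p.2])) PySem.Dict.empty
    from by rw [List.foldl_map]; rfl]
  rw [PySem.Dict.getD_foldl_modify_append]
  rw [PySem.List.enumerate_eq_map_pyRange a 0]
  simp only [PySem.Dict.getD_empty, List.nil_append, List.filter_map, List.map_map]
  simp [posOf, Function.comp_def, PySem.List.len]

lemma mem_posOf {a : List Int} {i p : Int} :
    p ∈ posOf a i ↔ 0 ≤ p ∧ p < (a.length : Int) ∧ PySem.List.pyGetD a p 0 = i := by
  simp [posOf, List.mem_filter, PySem.List.mem_pyRange_one, and_assoc]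

lemma posOf_sorted (a : List Int) (i : Int) : (posOf a i).Pairwise (· < ·) := by
  have hr : (PySem.List.pyRange 0 (a.length : Int)).Pairwise (· < ·) := by
    rw [PySem.List.pyRange_zero_natCast]
    exact (List.pairwise_lt_range).map _ (fun _ _ h => by exact_mod_cast h)
  exact List.Pairwise.sublist (List.filter_sublist) hr

lemma posOf_length (a : List Int) (i : Int) : (posOf a i).length = a.count i := by
  conv_rhs => rw [← PySem.List.map_pyGetD_pyRange_zero a 0]
  simp only [posOf, ← List.countP_eq_length_filter, List.count, List.countP_map, PySem.List.len]
  rfl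

-- A's scan returns cnt once the index is past len(a)-2
lemma scanA_stop {a : List Int} {i cur cnt : Int} (h : (a.length : Int) - 1 ≤ cur) :
    scanA a i cur cnt = cnt := by
  rw [scanA]; simp [show ¬ (cur < (a.length : Int) - 1) by omega]

-- if no occurrence of i lies at an index ≥ cur, A's scan never pairs again
lemma scanA_no (a : List Int) (i : Int) : ∀ (m : Nat) (cur cnt : Int),
    ((a.length : Int) - cur).toNat ≤ m → 0 ≤ cur →
    (∀ k, cur ≤ k → k < (a.length : Int) → PySem.List.pyGetD a k 0 ≠ i) →
    scanA a i cur cnt = cnt := by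
  intro m
  induction m with
  | zero =>
    intro cur cnt hm hc _
    exact scanA_stop (by omega)
  | succ m ih =>
    intro cur cnt hm hc hno
    by_cases h : cur < (a.length : Int) - 1
    · rw [scanA]
      have h1 : PySem.List.pyGetD a cur 0 ≠ i := hno cur le_rfl (by omega)
      have h2 : PySem.List.pyGetD a (cur + 1) 0 ≠ i := hno (cur + 1) (by omega) (by omega)
      simp only [h, dif_pos]
      rw [if_neg (by tauto)]
      exact ih (cur + 1) cnt (by omega) (by omega) (fun k hk hk' => hno k (by omega) hk')
    · exact scanA_stop (by omega)

-- A's scan walks silently from cur up to p-1 when [cur, p) holds no occurrence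
lemma scanA_advance (a : List Int) (i p : Int) (hp : p < (a.length : Int)) :
    ∀ (m : Nat) (cur cnt : Int),
    (p - 1 - cur).toNat ≤ m → 0 ≤ cur → cur ≤ p - 1 →
    (∀ k, cur ≤ k → k < p → PySem.List.pyGetD a k 0 ≠ i) →
    scanA a i cur cnt = scanA a i (p - 1) cnt := by
  intro m
  induction m with
  | zero =>
    intro cur cnt hm hc hcp _
    have : cur = p - 1 := by omega
    rw [this]
  | succ m ih =>
    intro cur cnt hm hc hcp hno
    rcases eq_or_lt_of_le hcp with he | hlt
    · rw [he]
    · rw [scanA]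
      have h1 : PySem.List.pyGetD a cur 0 ≠ i := hno cur le_rfl (by omega)
      have h2 : PySem.List.pyGetD a (cur + 1) 0 ≠ i := hno (cur + 1) (by omega) (by omega)
      simp only [show cur < (a.length : Int) - 1 by omega, dif_pos]
      rw [if_neg (by tauto)]
      exact ih (cur + 1) cnt (by omega) (by omega) (by omega)
        (fun k hk hk' => hno k (by omega) hk')

-- B's scan adds at most one pair per occurrence processed
lemma scanB_le (a : List Int) (i : Int) : ∀ (ps : List Int) (cur cnt : Int),
    scanB a i ps cur cnt ≤ cnt + ps.length := by
  intro ps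
  induction ps with
  | nil => intro cur cnt; simp [scanB]
  | cons p ps ih =>
    intro cur cnt
    rw [scanB]
    split
    · calc scanB a i ps (p + 1) (cnt + 1) ≤ cnt + 1 + ps.length := ih _ _
        _ ≤ _ := by simp only [List.length_cons]; push_cast; omega
    · split
      · calc scanB a i ps (p + 2) (cnt + 1) ≤ cnt + 1 + ps.length := ih _ _
          _ ≤ _ := by simp only [List.length_cons]; push_cast; omega
      · calc scanB a i ps (max cur (p + 1)) cnt ≤ cnt + ps.length := ih _ _
          _ ≤ _ := by simp only [List.length_cons]; push_cast; omega

-- key lemma: the two greedy scans agree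
lemma scan_eq (a : List Int) (i : Int) : ∀ (ps : List Int) (cur cnt : Int),
    0 ≤ cur →
    ps.Pairwise (· < ·) →
    (∀ p ∈ ps, 0 ≤ p ∧ p < (a.length : Int) ∧ PySem.List.pyGetD a p 0 = i) →
    (∀ k, cur ≤ k → k < (a.length : Int) → PySem.List.pyGetD a k 0 = i → k ∈ ps) →
    scanA a i cur cnt = scanB a i ps cur cnt := by
  intro ps
  induction ps with
  | nil =>
    intro cur cnt hc _ _ hall
    rw [scanB]
    exact scanA_no a i _ cur cnt le_rfl hc
      (fun k hk hk' hik => absurd (hall k hk hk' hik) (List.not_mem_nil))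
  | cons p ps ih =>
    intro cur cnt hc hsorted hmem hall
    obtain ⟨hp0, hpn, hpi⟩ := hmem p (List.mem_cons_self)
    have hgt : ∀ q ∈ ps, p < q := fun q hq => List.rel_of_pairwise_cons hsorted hq
    have hmem' : ∀ q ∈ ps, 0 ≤ q ∧ q < (a.length : Int) ∧ PySem.List.pyGetD a q 0 = i :=
      fun q hq => hmem q (List.mem_cons_of_mem _ hq)
    by_cases hpc : p < cur
    · -- occurrence already passed: B skips it, cur unchanged
      rw [scanB, if_neg (by rintro ⟨_, h, _⟩; omega), if_neg (by rintro ⟨h, _, _⟩; omega),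
        max_eq_left (by omega)]
      refine ih cur cnt hc hsorted.of_cons hmem' ?_
      intro k hk hkn hki
      rcases List.mem_cons.mp (hall k hk hkn hki) with rfl | h
      · omega
      · exact h
    · rw [not_lt] at hpc
      have hall' : ∀ k, p + 1 ≤ k → k < (a.length : Int) →
          PySem.List.pyGetD a k 0 = i → k ∈ ps := by
        intro k hk hkn hki
        rcases List.mem_cons.mp (hall k (by omega) hkn hki) with rfl | h
        · omega
        · exact h
      -- p is the first occurrence of i at an index ≥ cur
      have hmin : ∀ k, cur ≤ k → k < p → PySem.List.pyGetD a k 0 ≠ i := by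
        intro k hk hkp hki
        rcases List.mem_cons.mp (hall k hk (by omega) hki) with rfl | h
        · omega
        · exact absurd (hgt k h) (by omega)
      by_cases hcp1 : cur ≤ p - 1
      · -- A's scan reaches p-1 and pairs (p-1, p)
        have hprev : PySem.List.pyGetD a (p - 1) 0 ≠ i := hmin (p - 1) (by omega) (by omega)
        rw [scanB, if_pos ⟨by omega, hcp1, hprev⟩,
          scanA_advance a i p hpn (p - 1 - cur).toNat cur cnt le_rfl hc hcp1 hmin, scanA]
        simp only [show p - 1 < (a.length : Int) - 1 by omega, dif_pos,
          show p - 1 + 1 = p by omega]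
        rw [if_pos ⟨Or.inr hpi, by rw [hpi]; exact hprev⟩, show p - 1 + 2 = p + 1 by omega]
        exact ih (p + 1) (cnt + 1) (by omega) hsorted.of_cons hmem' hall'
      · have hcurp : cur = p := by omega
        rw [hcurp, scanB, if_neg (by rintro ⟨_, h, _⟩; omega)]
        by_cases hend : p + 1 ≤ (a.length : Int) - 1
        · by_cases hnext : PySem.List.pyGetD a (p + 1) 0 = i
          · -- a[p] = a[p+1] = i: no pair, both move on past p
            rw [if_neg (by rintro ⟨_, _, h⟩; exact h hnext), scanA]
            simp only [show p < (a.length : Int) - 1 by omega, dif_pos]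
            rw [if_neg (by rintro ⟨_, h⟩; exact h (by rw [hpi, hnext])),
              max_eq_right (by omega : p ≤ p + 1)]
            exact ih (p + 1) cnt (by omega) hsorted.of_cons hmem' hall'
          · -- pair (p, p+1)
            rw [if_pos ⟨le_rfl, hend, hnext⟩, scanA]
            simp only [show p < (a.length : Int) - 1 by omega, dif_pos]
            rw [if_pos ⟨Or.inl hpi, by rw [hpi]; exact fun h => hnext h.symm⟩]
            exact ih (p + 2) (cnt + 1) (by omega) hsorted.of_cons hmem'
              (fun k hk => hall' k (by omega))
        · -- p is the last index: the loop is already over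
          rw [if_neg (by rintro ⟨_, h, _⟩; exact hend h),
            scanA_stop (show (a.length : Int) - 1 ≤ p by omega),
            max_eq_right (by omega : p ≤ p + 1),
            ← ih (p + 1) cnt (by omega) hsorted.of_cons hmem' hall']
          exact (scanA_stop (by omega)).symm

lemma scan_eq_posOf (a : List Int) (i : Int) :
    scanA a i 0 0 = scanB a i (posOf a i) 0 0 := by
  refine scan_eq a i (posOf a i) 0 0 le_rfl (posOf_sorted a i) ?_ ?_
  · intro p hp; exact mem_posOf.mp hp
  · intro k _ hk hik; exact mem_posOf.mpr ⟨by omega, hk, hik⟩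

-- A's pruned max-fold over the distinct values equals B's plain max-fold
lemma foldl_prune (a : List Int) : ∀ (ks : List Int) (ans : Int),
    ks.foldl (fun answer i => if (PySem.Dict.counter a).getD i 0 ≤ answer then answer
      else max (scanA a i 0 0) answer) ans
    = ks.foldl (fun best k => max best (scanB a k (posOf a k) 0 0)) ans := by
  intro ks
  induction ks with
  | nil => intro ans; rfl
  | cons k ks ih =>
    intro ans
    simp only [List.foldl_cons]
    rw [show (if (PySem.Dict.counter a).getD k 0 ≤ ans then ans
        else max (scanA a k 0 0) ans) = max ans (scanB a k (posOf a k) 0 0) from ?_, ih]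
    have hs : scanA a k 0 0 = scanB a k (posOf a k) 0 0 := scan_eq_posOf a k
    have hle : scanB a k (posOf a k) 0 0 ≤ (0 : Int) + (posOf a k).length :=
      scanB_le a k (posOf a k) 0 0
    rw [posOf_length] at hle
    rw [PySem.Dict.getD_counter]
    split_ifs with h
    · exact (max_eq_left (by omega)).symm
    · rw [hs, max_comm]

-- ===== VERDICT (by name: the statement is the Claim_ definition above) =====
theorem solution_spec : Claim_equal_solution := by
  intro a _
  simp only [Spec_solution, solution, solution_alt]
  have hnodup : ((PySem.List.enumerate a).foldl
      (fun d q => d.modify q.2 [] (fun l => l ++ [q.1])) PySem.Dict.empty).keys.Nodup :=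
    PySem.Dict.nodup_keys_foldl_modify_key _ Prod.snd [] _ _ (by simp)
  rw [PySem.Dict.items_eq_map_keys _ hnodup [], List.foldl_map]
  rw [show ((PySem.List.enumerate a).foldl
      (fun d q => d.modify q.2 [] (fun l => l ++ [q.1])) PySem.Dict.empty).keys
    = PySem.Set.ofList a from by
      rw [PySem.Dict.keys_foldl_modify_key _ Prod.snd]
      simp [PySem.List.map_snd_enumerate]; rfl]
  rw [PySem.Dict.keys_counter]
  simp only [posOf_getD]
  rw [foldl_prune]
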